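-- pv_equiv track=rewrite | github.com/jonnylil12/prodject_1 | array.py | numPlayers
-- ===== SOURCE A (Python) =====
-- def numPlayers(cutOffRank,scores):
--     x ,scores = [] , scores.copy()
--     while len(set(x)) != cutOffRank:
--       if scores:
--         x.append(max(scores))
--         scores.remove(max(scores))
--       else:
--         return len(x)
--     return len(x)
-- ===== SOURCE B (Python) =====
-- def numPlayers(cutOffRank, scores):
--     distinct = 0
--     prev = None
--     for i, s in enumerate(sorted(scores, reverse=True)):
--         if distinct == cutOffRank:
--             return i
--         if prev is None or s != prev:
--             distinct += 1
--         prev = s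
--     return len(scores)
-- ===== Notes on version B (the rewrite author's own statement) =====
-- stated objective: faster
-- what changed: A repeatedly recomputes and removes max(scores) (quadratic selection) while counting distinct picks; B sorts once in descending order and makes a single scan counting distinct values, returning the index where the distinct count reaches cutOffRank.
import Mathlib
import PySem

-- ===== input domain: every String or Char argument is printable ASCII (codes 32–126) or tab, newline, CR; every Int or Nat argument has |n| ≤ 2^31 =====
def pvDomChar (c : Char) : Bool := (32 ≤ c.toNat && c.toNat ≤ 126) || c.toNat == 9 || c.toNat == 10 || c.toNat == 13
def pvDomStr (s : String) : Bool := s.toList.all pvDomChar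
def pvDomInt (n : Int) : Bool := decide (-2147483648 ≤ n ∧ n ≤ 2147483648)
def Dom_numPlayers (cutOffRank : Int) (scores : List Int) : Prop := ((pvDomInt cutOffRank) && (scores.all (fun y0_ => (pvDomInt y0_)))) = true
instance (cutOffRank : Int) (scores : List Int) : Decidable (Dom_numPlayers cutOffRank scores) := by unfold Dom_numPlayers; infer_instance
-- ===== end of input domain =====

-- B replaces A's repeated max-selection loop by one descending sort and a single counting scan (objective: faster).

-- ===== PORT A =====
-- A's while-loop: repeatedly append max(scores) to x and remove it, until len(set(x)) == cutOffRank
-- or scores is exhausted.  fuel = scores.length + 1 only makes the recursion total; each iteration that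
-- recurses removes one element, so fuel is never exhausted.
def numPlayersLoop (cut : Int) : Nat → List Int → List Int → Int
  | 0, x, _ => (x.length : Int)
  | fuel + 1, x, scores =>
    if ((PySem.Set.ofList x).length : Int) ≠ cut then
      match scores with
      | [] => (x.length : Int)
      | _ :: _ =>
        match PySem.List.max? scores (fun y => y) with
        | some m => numPlayersLoop cut fuel (x ++ [m]) ((PySem.List.remove? scores m).getD [])
        | none => (x.length : Int)   -- unreachable: scores ≠ []
    else (x.length : Int)

def numPlayers (cutOffRank : Int) (scores : List Int) : Int :=
  numPlayersLoop cutOffRank (scores.length + 1) [] scores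

-- ===== PORT B =====
-- B's for-loop over enumerate(sorted(scores, reverse=True)): 'some i' is the early 'return i'.
def numPlayersAltGo (cut : Int) (distinct : Int) (prev : Option Int) (i : Int) : List Int → Option Int
  | [] => none
  | s :: rest =>
    if distinct = cut then some i
    else
      numPlayersAltGo cut
        (if prev = none ∨ some s ≠ prev then distinct + 1 else distinct)
        (some s) (i + 1) rest

def numPlayers_alt (cutOffRank : Int) (scores : List Int) : Int :=
  (numPlayersAltGo cutOffRank 0 none 0
      (PySem.List.sorted scores (fun y => y) true)).getD (scores.length : Int)

-- ===== PRECONDITION & SPEC =====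
def Spec_numPlayers (cutOffRank : Int) (scores : List Int) (out : Int) : Prop := out = numPlayers_alt cutOffRank scores
instance (cutOffRank : Int) (scores : List Int) (out : Int) : Decidable (Spec_numPlayers cutOffRank scores out) := by unfold Spec_numPlayers; infer_instance

-- ===== CLAIM (what is proved, stated in full; the proofs are below) =====
def Claim_equal_numPlayers : Prop := ∀ (cutOffRank : Int) (scores : List Int), Dom_numPlayers cutOffRank scores → Spec_numPlayers cutOffRank scores (numPlayers cutOffRank scores)

-- ===== LEMMAS AND PROOFS =====

-- A's loop, replayed over the descending-sorted list: popping the head instead of removing the max.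
def refLoop (cut : Int) : List Int → List Int → Int
  | x, [] => (x.length : Int)
  | x, m :: t =>
    if ((PySem.Set.ofList x).length : Int) ≠ cut then refLoop cut (x ++ [m]) t
    else (x.length : Int)

theorem sortedDesc_cons_max {scores : List Int} {m : Int}
    (hm : PySem.List.max? scores (fun y => y) = some m) :
    PySem.List.sorted scores (fun y => y) true
      = m :: PySem.List.sorted (scores.erase m) (fun y => y) true := by
  have hmem : m ∈ scores := PySem.List.max?_mem hm
  have hmax : ∀ y ∈ scores, y ≤ m := PySem.List.max?_isMax hm
  -- both sides are permutations of scores and pairwise descending; they are equal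
  have hperm1 : (PySem.List.sorted scores (fun y => y) true).Perm scores :=
    PySem.List.sorted_perm ..
  have hperm2 : (m :: PySem.List.sorted (scores.erase m) (fun y => y) true).Perm scores := by
    refine (List.Perm.cons m (PySem.List.sorted_perm ..)).trans ?_
    exact (List.perm_cons_erase hmem).symm
  have hp1 : (PySem.List.sorted scores (fun y => y) true).Pairwise
      (fun a b => (fun z : Int => -z) a ≤ (fun z : Int => -z) b) := by
    have := PySem.List.sorted_pairwise_rev (xs := scores) (key := fun y : Int => y)
    exact this.imp (by intro a b h; simpa using h)
  have hp2 : (m :: PySem.List.sorted (scores.erase m) (fun y => y) true).Pairwise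
      (fun a b => (fun z : Int => -z) a ≤ (fun z : Int => -z) b) := by
    refine List.Pairwise.cons ?_ ?_
    · intro b hb
      have hb' : b ∈ scores.erase m := by
        simpa [PySem.List.mem_sorted] using hb
      have : b ∈ scores := List.mem_of_mem_erase hb'
      simpa using hmax b this
    · have := PySem.List.sorted_pairwise_rev (xs := scores.erase m) (key := fun y : Int => y)
      exact this.imp (by intro a b h; simpa using h)
  exact PySem.List.eq_of_perm_of_pairwise_le_of_injective (fun z : Int => -z)
    (fun a b h => by simpa using neg_injective h) (hperm1.trans hperm2.symm) hp1 hp2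

theorem numPlayersLoop_eq_refLoop (cut : Int) :
    ∀ (fuel : Nat) (scores x : List Int), scores.length < fuel →
      numPlayersLoop cut fuel x scores
        = refLoop cut x (PySem.List.sorted scores (fun y => y) true) := by
  intro fuel
  induction fuel with
  | zero => intro scores x h; omega
  | succ n ih =>
    intro scores x h
    match scores with
    | [] =>
      have hnil : PySem.List.sorted ([] : List Int) (fun y : Int => y) true = [] :=
        (PySem.List.sorted_eq_nil_iff ..).2 rfl
      rw [hnil]
      unfold numPlayersLoop refLoop
      split <;> rfl
    | a :: t =>
      obtain ⟨m, hm⟩ : ∃ m, PySem.List.max? (a :: t) (fun y : Int => y) = some m := by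
        cases hmm : PySem.List.max? (a :: t) (fun y : Int => y) with
        | none => exact absurd ((PySem.List.max?_eq_none_iff ..).1 hmm) (by simp)
        | some m => exact ⟨m, rfl⟩
      have hmem : m ∈ a :: t := PySem.List.max?_mem hm
      have hrem : PySem.List.remove? (a :: t) m = some ((a :: t).erase m) :=
        PySem.List.remove?_eq_some_erase _ m hmem
      have hlen : ((a :: t).erase m).length < n := by
        have h1 := List.length_erase_of_mem hmem
        simp only [List.length_cons] at h1 h
        omega
      rw [sortedDesc_cons_max hm]
      simp only [numPlayersLoop, refLoop, hm, hrem]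
      split
      · exact ih _ _ hlen
      · rfl

-- counting a new element: set(x ++ [s]) grows iff s ∉ x
theorem setLen_append (x : List Int) (s : Int) :
    (PySem.Set.ofList (x ++ [s])).length
      = if s ∈ x then (PySem.Set.ofList x).length else (PySem.Set.ofList x).length + 1 := by
  have h1 : PySem.Set.ofList (x ++ [s]) = PySem.Set.add (PySem.Set.ofList x) s := by
    rw [PySem.Set.ofList_eq_foldl, PySem.Set.ofList_eq_foldl, List.foldl_append]
    rfl
  rw [h1]
  unfold PySem.Set.add
  by_cases hs : s ∈ x
  · simp [hs]
  · simp [hs]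

-- the central invariant: A's replayed loop equals B's scan, with distinct = |set x|, prev = last of x
theorem refLoop_eq_altGo (cut : Int) :
    ∀ (l x : List Int),
      x.Pairwise (fun a b => b ≤ a) →
      (∀ s ∈ l, ∀ a ∈ x, s ≤ a) →
      l.Pairwise (fun a b => b ≤ a) →
      refLoop cut x l
        = (numPlayersAltGo cut ((PySem.Set.ofList x).length : Int) x.getLast? (x.length : Int) l).getD
            ((x.length + l.length : Nat) : Int) := by
  intro l
  induction l with
  | nil => intro x _ _ _; simp [refLoop, numPlayersAltGo]
  | cons s t ih =>
    intro x hx hlx hl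
    simp only [refLoop, numPlayersAltGo]
    by_cases hc : ((PySem.Set.ofList x).length : Int) = cut
    · simp [hc]
    · have hc' : ¬ ((PySem.Set.ofList x).length : Int) = cut := hc
      rw [if_pos hc', if_neg hc]
      -- s ∈ x ↔ (x.getLast? = some s), given s ≤ all of x and x descending
      have hsx : (s ∈ x) ↔ (x.getLast? = some s) := by
        constructor
        · intro hmem
          have hle : ∀ a ∈ x, s ≤ a := hlx s (by simp)
          cases x with
          | nil => simp at hmem
          | cons a t' =>
            have hne : (a :: t') ≠ [] := by simp
            have hlast : (a :: t').getLast hne ∈ (a :: t') := List.getLast_mem hne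
            have h1 : s ≤ (a :: t').getLast hne := hle _ hlast
            have h2 : (a :: t').getLast hne ≤ s := by
              have hmin : ∀ y ∈ (a :: t'), (a :: t').getLast hne ≤ y := by
                intro y hy
                rcases (List.mem_iff_getElem).1 hy with ⟨i, hi, rfl⟩
                rw [List.getLast_eq_getElem]
                have hpw := List.pairwise_iff_getElem.1 hx
                rcases lt_trichotomy i ((a :: t').length - 1) with hlt | heq | hgt
                · exact hpw i ((a :: t').length - 1) hi (by simp) hlt
                · subst heq; exact le_rfl
                · omega
              exact hmin s hmem
            rw [List.getLast?_eq_some_getLast hne]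
            exact congrArg some (le_antisymm h2 h1)
        · intro hlast
          have hne : x ≠ [] := by rintro rfl; simp at hlast
          rw [List.getLast?_eq_some_getLast hne] at hlast
          have := List.getLast_mem hne
          rwa [Option.some_inj.1 hlast] at this
      -- the branch condition of B corresponds to s ∉ x
      have hbranch : (x.getLast? = none ∨ some s ≠ x.getLast?) ↔ s ∉ x := by
        rw [hsx]
        match x with
        | [] => simp
        | a :: t' => simp [eq_comm]
      have hstep :
          (if x.getLast? = none ∨ some s ≠ x.getLast?
            then ((PySem.Set.ofList x).length : Int) + 1
            else ((PySem.Set.ofList x).length : Int))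
          = ((PySem.Set.ofList (x ++ [s])).length : Int) := by
        rw [setLen_append]
        by_cases hmem : s ∈ x
        · rw [if_neg (by rw [hbranch]; simp [hmem]), if_pos hmem]
        · rw [if_pos (hbranch.mpr hmem), if_neg hmem]; push_cast; ring
      have hlast' : (x ++ [s]).getLast? = some s := by simp
      have hlen' : ((x ++ [s]).length : Int) = (x.length : Int) + 1 := by simp
      have ihx : (x ++ [s]).Pairwise (fun a b => b ≤ a) := by
        rw [List.pairwise_append]
        refine ⟨hx, by simp, ?_⟩
        intro a ha b hb
        simp at hb; subst hb
        exact hlx b (by simp) a ha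
      have ihlx : ∀ u ∈ t, ∀ a ∈ x ++ [s], u ≤ a := by
        intro u hu a ha
        rcases List.mem_append.1 ha with ha | ha
        · exact hlx u (by simp [hu]) a ha
        · simp at ha; subst ha
          exact (List.pairwise_cons.1 hl).1 u hu
      have iht : t.Pairwise (fun a b => b ≤ a) := (List.pairwise_cons.1 hl).2
      have := ih (x ++ [s]) ihx ihlx iht
      rw [this, hstep, hlast', hlen']
      congr 1
      simp; omega

-- ===== VERDICT (by name: the statement is the Claim_ definition above) =====
theorem numPlayers_spec : Claim_equal_numPlayers := by
  intro cut scores _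
  show numPlayers cut scores = numPlayers_alt cut scores
  unfold numPlayers numPlayers_alt
  rw [numPlayersLoop_eq_refLoop cut (scores.length + 1) scores [] (by omega)]
  have h := refLoop_eq_altGo cut (PySem.List.sorted scores (fun y => y) true) []
    (by simp) (by simp) (by
      have := PySem.List.sorted_pairwise_rev (xs := scores) (key := fun y : Int => y)
      exact this.imp (by intro a b h; simpa using h))
  simp only [PySem.Set.ofList, List.length_nil, Nat.cast_zero, List.getLast?_nil,
    Nat.zero_add] at h
  rw [h]
  simp [PySem.List.length_sorted]
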